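-- pv_equiv track=rewrite | github.com/brighta/advent-of-code-python | 2024/day_07/part2.py | makeEquation
-- ===== SOURCE A (Python) =====
-- def makeEquation(numbers):
--     if len(numbers) == 1:
--         return [numbers[0]]
--     answers = []
--     answers.extend(makeEquation([numbers[0] + numbers[1]] + numbers[2:]))
--     answers.extend(makeEquation([numbers[0] * numbers[1]] + numbers[2:]))
--     answers.extend(makeEquation([int("{}{}".format(numbers[0], numbers[1]))] + numbers[2:]))
--     return answers
-- ===== SOURCE B (Python) =====
-- def makeEquation(numbers):
--     results = [numbers[0]]
--     for num in numbers[1:]: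
--         new = []
--         for r in results:
--             new.append(r + num)
--             new.append(r * num)
--             new.append(int(str(r) + str(num)))
--         results = new
--     return results
-- ===== Notes on version B (the rewrite author's own statement) =====
-- stated objective: alternative
-- what changed: Replaces the triple-branching recursion (three recursive calls concatenated per step) with a single iterative left-to-right pass that maintains the list of all partial values and expands each by +, * and concat per number.
import Mathlib
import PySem

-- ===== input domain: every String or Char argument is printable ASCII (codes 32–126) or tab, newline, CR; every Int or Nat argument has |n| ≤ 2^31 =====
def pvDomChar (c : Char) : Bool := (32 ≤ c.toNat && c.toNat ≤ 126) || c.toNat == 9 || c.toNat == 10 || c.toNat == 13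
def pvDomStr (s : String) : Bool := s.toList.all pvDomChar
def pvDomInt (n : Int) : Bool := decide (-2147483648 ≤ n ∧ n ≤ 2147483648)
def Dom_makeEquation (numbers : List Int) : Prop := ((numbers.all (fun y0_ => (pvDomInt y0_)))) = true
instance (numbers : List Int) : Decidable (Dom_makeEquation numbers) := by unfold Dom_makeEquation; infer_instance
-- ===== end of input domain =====

-- B replaces A's triple-branching recursion by one iterative left-to-right pass over a running
-- list of partial values (objective: alternative decomposition; same output, same order).

-- ===== PORT A =====
-- int("{}{}".format(a, b)) = int(str(a) + str(b)); .getD 0 is unreachable inside Pre_ (tail nonnegative ⇒ valid int literal)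
def pyConcat (a b : Int) : Int :=
  (PySem.Int.ofStr? (PySem.Int.toStr a ++ PySem.Int.toStr b)).getD 0

def makeEquation (numbers : List Int) : List Int :=
  match numbers with
  | [] => []   -- A raises IndexError here; excluded by Pre_
  | [a] => [a]
  | a :: b :: rest =>
      makeEquation ((a + b) :: rest) ++ makeEquation ((a * b) :: rest)
        ++ makeEquation ((pyConcat a b) :: rest)
termination_by numbers.length
decreasing_by all_goals simp

-- ===== PORT B =====
-- one step of B's outer loop: the inner 'for r in results' appending r+num, r*num, concat
def altStep (results : List Int) (num : Int) : List Int :=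
  results.flatMap (fun r => [r + num, r * num, pyConcat r num])

def makeEquation_alt (numbers : List Int) : List Int :=
  match numbers with
  | [] => []   -- B raises IndexError here; excluded by Pre_
  | first :: rest => List.foldl altStep [first] rest

-- ===== PRECONDITION & SPEC =====
-- A raises IndexError on the empty list and ValueError (int("…-…")) whenever some element of
-- numbers[1:] is negative (it then appears as the right operand of a concat); Pre_ excludes exactly those.
def Pre_makeEquation (numbers : List Int) : Prop :=
  numbers ≠ [] ∧ ∀ x ∈ numbers.tail, 0 ≤ x
instance (numbers : List Int) : Decidable (Pre_makeEquation numbers) := by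
  unfold Pre_makeEquation; infer_instance

def pvWitness_makeEquation : List Int := [-3, 2, 10]

def Spec_makeEquation (numbers : List Int) (out : List Int) : Prop := out = makeEquation_alt numbers
instance (numbers : List Int) (out : List Int) : Decidable (Spec_makeEquation numbers out) := by unfold Spec_makeEquation; infer_instance

-- ===== CLAIM (what is proved, stated in full; the proofs are below) =====
def Claim_equal_makeEquation : Prop := ∀ (numbers : List Int), Dom_makeEquation numbers → Pre_makeEquation numbers → Spec_makeEquation numbers (makeEquation numbers)

-- ===== LEMMAS AND PROOFS =====

theorem altStep_append (l1 l2 : List Int) (n : Int) :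
    altStep (l1 ++ l2) n = altStep l1 n ++ altStep l2 n := by
  simp [altStep]

theorem foldl_altStep_append (rest : List Int) (l1 l2 : List Int) :
    List.foldl altStep (l1 ++ l2) rest
      = List.foldl altStep l1 rest ++ List.foldl altStep l2 rest := by
  induction rest generalizing l1 l2 with
  | nil => rfl
  | cons b rest ih => simp only [List.foldl_cons, altStep_append, ih]

theorem makeEquation_eq_foldl (rest : List Int) (a : Int) :
    makeEquation (a :: rest) = List.foldl altStep [a] rest := by
  induction rest generalizing a with
  | nil => simp [makeEquation]
  | cons b rest ih =>
      have h3 : altStep [a] b = [a + b] ++ [a * b] ++ [pyConcat a b] := by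
        simp [altStep]
      rw [makeEquation, List.foldl_cons, h3, foldl_altStep_append, foldl_altStep_append,
        ih, ih, ih]

-- ===== VERDICT (by name: the statement is the Claim_ definition above) =====
theorem makeEquation_spec : Claim_equal_makeEquation := by
  intro numbers _ hpre
  unfold Spec_makeEquation
  match numbers with
  | [] => exact absurd rfl hpre.1
  | a :: rest => simpa [makeEquation_alt] using makeEquation_eq_foldl rest a
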